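-- pv_equiv track=rewrite | github.com/kuuroooo/GreenLab | targetSystem/benchmarks/sol1/sol1_G7.py | solution
-- ===== SOURCE A (Python) =====
-- import math
--
-- def prime_sieve(n: int) -> list:
--     """
--     Sieve of Erotosthenes
--     Function to return all the prime numbers up to a certain number
--     https://en.wikipedia.org/wiki/Sieve_of_Eratosthenes
--     >>> prime_sieve(3)
--     [2]
--     >>> prime_sieve(50)
--     [2, 3, 5, 7, 11, 13, 17, 19, 23, 29, 31, 37, 41, 43, 47]
--     """
--     is_prime = [True] * n
--     is_prime[0] = False
--     is_prime[1] = False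
--     is_prime[2] = True
--
--     for i in range(3, int(n**0.5 + 1), 2):
--         index = i * 2
--         while index < n:
--             is_prime[index] = False
--             index = index + i
--
--     primes = [2]
--
--     for i in range(3, n, 2):
--         if is_prime[i]:
--             primes.append(i)
--
--     return primes
--
-- def sum_ap_multiples_in_range(k: int, L: int, R: int) -> int:
--     """
--     G7: Bulk operation - sum of multiples of k in [L, R], inclusive
--     Uses arithmetic progression formula instead of individual iterations
--     """
--     if L > R:
--         return 0
--     first = ((L + k - 1) // k) * k
--     if first > R:
--         return 0
--     last = (R // k) * k
--     n = (last - first) // k + 1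
--     return n * (first + last) // 2
--
-- def solution(limit: int = 999_966_663_333) -> int:
--     """
--     Computes the solution to the problem up to the specified limit
--     >>> solution(1000)
--     34825
--
--     >>> solution(10_000)
--     1134942
--
--     >>> solution(100_000)
--     36393008
--     """
--     primes_upper_bound = math.floor(math.sqrt(limit)) + 100
--     primes = prime_sieve(primes_upper_bound)
--
--     matches_sum = 0
--     prime_index = 0
--     last_prime = primes[prime_index]
--
--     while (last_prime**2) <= limit:
--         next_prime = primes[prime_index + 1]
--
--         lower_bound = last_prime**2
--         upper_bound = next_prime**2
--
--         # G7: Use bulk operations instead of individual loops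
--         # Get numbers divisible by lps(current) - use arithmetic progression
--         hi = min(limit, upper_bound - 1)
--         if hi >= lower_bound + last_prime:
--             sum_p = sum_ap_multiples_in_range(last_prime, lower_bound + 1, hi)
--             matches_sum += sum_p
--
--         # Add the numbers divisible by ups(current) - use arithmetic progression
--         if hi >= lower_bound + next_prime:
--             sum_q = sum_ap_multiples_in_range(next_prime, lower_bound + 1, hi)
--             matches_sum += sum_q
--
--         # Remove the numbers divisible by both ups and lps - use arithmetic progression
--         if hi >= lower_bound + last_prime * next_prime:
--             sum_pq = sum_ap_multiples_in_range(last_prime * next_prime, lower_bound + 1, hi)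
--             matches_sum -= 2 * sum_pq
--
--         # Setup for next pair
--         last_prime = next_prime
--         prime_index += 1
--
--     return matches_sum
-- ===== SOURCE B (Python) =====
-- import math
--
-- def prime_sieve(n: int) -> list:
--     is_prime = [True] * n
--     is_prime[0] = False
--     is_prime[1] = False
--     is_prime[2] = True
--
--     for i in range(3, int(n**0.5 + 1), 2):
--         index = i * 2
--         while index < n:
--             is_prime[index] = False
--             index = index + i
--
--     primes = [2]
--
--     for i in range(3, n, 2):
--         if is_prime[i]:
--             primes.append(i)
--
--     return primes
--
-- def solution(limit: int = 999_966_663_333) -> int: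
--     # Same sieve and outer pair loop; the three AP closed-form calls are replaced
--     # by one uniform pass over (modulus, sign) triples with explicit multiple-stepping loops.
--     primes = prime_sieve(math.floor(math.sqrt(limit)) + 100)
--
--     matches_sum = 0
--     prime_index = 0
--     last_prime = primes[prime_index]
--
--     while last_prime**2 <= limit:
--         next_prime = primes[prime_index + 1]
--         lower_bound = last_prime**2
--         hi = min(limit, next_prime**2 - 1)
--
--         for k, sign in ((last_prime, 1), (next_prime, 1), (last_prime * next_prime, -2)):
--             if hi >= lower_bound + k:
--                 m = (lower_bound + k) // k * k  # first multiple of k >= lower_bound + 1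
--                 while m <= hi:
--                     matches_sum += sign * m
--                     m += k
--
--         last_prime = next_prime
--         prime_index += 1
--
--     return matches_sum
-- ===== Notes on version B (the rewrite author's own statement) =====
-- stated objective: alternative
-- what changed: The three guarded arithmetic-progression closed-form calls (sum_ap_multiples_in_range) are replaced by one uniform pass over (modulus, sign) triples that sums the multiples by explicit stepping loops from the first multiple above lower_bound; sieve and outer pair loop are kept.
import Mathlib
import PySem

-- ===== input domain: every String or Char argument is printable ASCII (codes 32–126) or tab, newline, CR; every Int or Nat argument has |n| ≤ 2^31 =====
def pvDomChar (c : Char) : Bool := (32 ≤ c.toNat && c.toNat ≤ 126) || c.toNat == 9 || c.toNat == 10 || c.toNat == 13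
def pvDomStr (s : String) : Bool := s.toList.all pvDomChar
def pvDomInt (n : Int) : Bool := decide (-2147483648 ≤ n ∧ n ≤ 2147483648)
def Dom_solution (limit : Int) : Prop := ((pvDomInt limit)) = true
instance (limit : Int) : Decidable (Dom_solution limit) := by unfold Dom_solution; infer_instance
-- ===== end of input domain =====

-- B replaces the three guarded AP closed-form sums by one uniform pass over (modulus, sign)
-- triples with explicit multiple-stepping loops (objective: alternative decomposition, same cost).

-- ===== PORT A =====

-- inner marking loop of prime_sieve: `index = i*2; while index < n: is_prime[index] = False; index += i`
-- (fuel only makes the recursion structural; the initial fuel (n - i*2).toNat covers every iteration since i ≥ 3)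
def markLoop (i n : Int) : Nat → List Bool → Int → List Bool
  | 0, arr, _ => arr
  | fuel + 1, arr, index =>
    if index < n then markLoop i n fuel (arr.set index.toNat false) (index + i) else arr

-- port of prime_sieve (shared verbatim by A and B, like the Python helper).
-- `int(n**0.5 + 1)` is ported as Nat.sqrt n + 1: exact for the 0 ≤ n ≤ 2^31 range Dom admits.
def primeSieve (n : Int) : List Int :=
  let isPrime0 := List.replicate n.toNat true
  let isPrime1 := ((isPrime0.set 0 false).set 1 false).set 2 true
  let isPrime2 := (PySem.List.pyRange 3 ((Nat.sqrt n.toNat : Nat) + 1 : Int) 2).foldl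
      (fun arr i => markLoop i n (n - i * 2).toNat arr (i * 2)) isPrime1
  (PySem.List.pyRange 3 n 2).foldl
      (fun primes i => if PySem.List.pyGetD isPrime2 i false = true then primes ++ [i] else primes) [2]

def sumApMultiplesInRange (k L R : Int) : Int :=
  if L > R then 0
  else
    let first := PySem.Int.floordiv (L + k - 1) k * k
    if first > R then 0
    else
      let last := PySem.Int.floordiv R k * k
      let n := PySem.Int.floordiv (last - first) k + 1
      PySem.Int.floordiv (n * (first + last)) 2

-- A's while loop over consecutive prime pairs.  `primes[prime_index + 1]` is guarded by the
-- dependent bound check (in range for every limit Pre_ admits inside Dom; Python raises beyond it);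
-- the fuel primes.length covers every iteration, since each one needs i + 1 < primes.length.
def loopA (limit : Int) (primes : List Int) : Nat → Nat → Int → Int → Int
  | 0, _, _, matchesSum => matchesSum
  | fuel + 1, i, lastPrime, matchesSum =>
    if lastPrime ^ 2 ≤ limit then
      if h : i + 1 < primes.length then
        let nextPrime := primes[i + 1]
        let lowerBound := lastPrime ^ 2
        let upperBound := nextPrime ^ 2
        let hi := min limit (upperBound - 1)
        let s1 := if lowerBound + lastPrime ≤ hi then sumApMultiplesInRange lastPrime (lowerBound + 1) hi else 0
        let s2 := if lowerBound + nextPrime ≤ hi then sumApMultiplesInRange nextPrime (lowerBound + 1) hi else 0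
        let s3 := if lowerBound + lastPrime * nextPrime ≤ hi then sumApMultiplesInRange (lastPrime * nextPrime) (lowerBound + 1) hi else 0
        loopA limit primes fuel (i + 1) nextPrime (matchesSum + s1 + s2 - 2 * s3)
      else matchesSum
    else matchesSum

-- math.floor(math.sqrt(limit)) is exact isqrt for 0 ≤ limit ≤ 2^31 (doubles); negative limit raises (outside Pre_)
def solution (limit : Int) : Int :=
  let primesUpperBound : Int := (Nat.sqrt limit.toNat : Nat) + 100
  let primes := primeSieve primesUpperBound
  if h : 0 < primes.length then loopA limit primes primes.length 0 primes[0] 0 else 0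

-- ===== PORT B =====

-- `m = (lower_bound + k) // k * k; while m <= hi: matches_sum += sign * m; m += k`
-- (fuel only makes the recursion structural; the initial fuel (hi + 1 - m).toNat covers every iteration since k ≥ 2)
def mulLoop (k hi sign : Int) : Nat → Int → Int → Int
  | 0, _, acc => acc
  | fuel + 1, m, acc =>
    if m ≤ hi then mulLoop k hi sign fuel (m + k) (acc + sign * m) else acc

def loopB (limit : Int) (primes : List Int) : Nat → Nat → Int → Int → Int
  | 0, _, _, matchesSum => matchesSum
  | fuel + 1, i, lastPrime, matchesSum =>
    if lastPrime ^ 2 ≤ limit then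
      if h : i + 1 < primes.length then
        let nextPrime := primes[i + 1]
        let lowerBound := lastPrime ^ 2
        let hi := min limit (nextPrime ^ 2 - 1)
        let ms := [(lastPrime, (1 : Int)), (nextPrime, 1), (lastPrime * nextPrime, -2)].foldl
          (fun acc ks =>
            if lowerBound + ks.1 ≤ hi then
              let m := PySem.Int.floordiv (lowerBound + ks.1) ks.1 * ks.1
              mulLoop ks.1 hi ks.2 (hi + 1 - m).toNat m acc
            else acc) matchesSum
        loopB limit primes fuel (i + 1) nextPrime ms
      else matchesSum
    else matchesSum

def solution_alt (limit : Int) : Int :=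
  let primes := primeSieve ((Nat.sqrt limit.toNat : Nat) + 100 : Int)
  if h : 0 < primes.length then loopB limit primes primes.length 0 primes[0] 0 else 0

-- ===== PRECONDITION & SPEC =====
-- Python A raises ValueError (math.sqrt of a negative number) for limit < 0; nothing else raises inside Dom.
def Pre_solution (limit : Int) : Prop := 0 ≤ limit
instance (limit : Int) : Decidable (Pre_solution limit) := by unfold Pre_solution; infer_instance
def pvWitness_solution : Int := (1000)

def Spec_solution (limit : Int) (out : Int) : Prop := out = solution_alt limit
instance (limit : Int) (out : Int) : Decidable (Spec_solution limit out) := by unfold Spec_solution; infer_instance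

-- ===== CLAIM (what is proved, stated in full; the proofs are below) =====
def Claim_equal_solution : Prop := ∀ (limit : Int), Dom_solution limit → Pre_solution limit → Spec_solution limit (solution limit)

-- ===== LEMMAS AND PROOFS =====

-- the guarded AP sum of multiples of k, starting at the multiple m, up to hi (A's formula with first := m)
def apFrom (k hi m : Int) : Int :=
  if hi < m then 0
  else
    let last := PySem.Int.floordiv hi k * k
    PySem.Int.floordiv ((PySem.Int.floordiv (last - m) k + 1) * (m + last)) 2

theorem fd_bounds (a b : Int) (hb : 0 < b) :
    PySem.Int.floordiv a b * b ≤ a ∧ a < (PySem.Int.floordiv a b + 1) * b := by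
  constructor
  · exact (PySem.Int.le_floordiv_iff_mul_le hb).mp le_rfl
  · exact (PySem.Int.floordiv_lt_iff_lt_mul hb).mp (lt_add_one _)

theorem fd_mul_cancel (a b : Int) (hb : 0 < b) : PySem.Int.floordiv (a * b) b = a := by
  rw [PySem.Int.floordiv_eq_iff_of_pos hb]
  constructor
  · exact le_rfl
  · nlinarith

theorem fd_of_bounds (a b hi : Int) (hb : 0 < b) (h1 : a * b ≤ hi) (h2 : hi < (a + 1) * b) :
    PySem.Int.floordiv hi b = a := by
  rw [PySem.Int.floordiv_eq_iff_of_pos hb]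
  exact ⟨h1, h2⟩

theorem fd_two_add (x m : Int) : PySem.Int.floordiv (x + m * 2) 2 = PySem.Int.floordiv x 2 + m := by
  have h := fd_bounds x 2 (by norm_num)
  rw [PySem.Int.floordiv_eq_iff_of_pos (by norm_num : (0:Int) < 2)]
  constructor <;> nlinarith [h.1, h.2]

theorem mulLoop_eq (k hi sign : Int) (hk : 0 < k) :
    ∀ (fuel : Nat) (m acc : Int), k ∣ m → (hi + 1 - m).toNat ≤ fuel →
      mulLoop k hi sign fuel m acc = acc + sign * apFrom k hi m := by
  intro fuel
  induction fuel with
  | zero =>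
    intro m acc _ hf
    have hm : hi < m := by omega
    simp [mulLoop, apFrom, if_pos hm]
  | succ fuel ih =>
    intro m acc hd hf
    rw [mulLoop]
    by_cases hle : m ≤ hi
    · rw [if_pos hle]
      obtain ⟨a, rfl⟩ := hd
      rw [ih (k * a + k) _ (Dvd.intro (a + 1) (by ring)) (by omega)]
      by_cases hstop : hi < k * a + k
      · -- last iteration: apFrom k hi (k*a) = k*a, next is empty
        have hlast : PySem.Int.floordiv hi k = a := fd_of_bounds a k hi hk (by linarith) (by nlinarith)
        have hnext : apFrom k hi (k * a + k) = 0 := by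
          simp only [apFrom, if_pos (by linarith : hi < k * a + k)]
        have hcur : apFrom k hi (k * a) = k * a := by
          simp only [apFrom, if_neg (by linarith : ¬ hi < k * a)]
          rw [hlast]
          have h0 : a * k - k * a = 0 * k := by ring
          rw [h0, fd_mul_cancel 0 k hk]
          have h1 : (0 + 1) * (k * a + a * k) = 0 + (k * a) * 2 := by ring
          rw [h1, fd_two_add]
          simp [PySem.Int.floordiv]
        rw [hnext, hcur]; ring
      · -- middle iteration: apFrom k hi (k*a) = k*a + apFrom k hi (k*a+k)
        rw [not_lt] at hstop
        obtain ⟨b, hbdef⟩ : ∃ b, PySem.Int.floordiv hi k = b := ⟨_, rfl⟩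
        have hcur : apFrom k hi (k * a) = PySem.Int.floordiv ((b - a + 1) * (a * k + b * k)) 2 := by
          simp only [apFrom, if_neg (by linarith : ¬ hi < k * a)]
          rw [hbdef]
          have h0 : b * k - k * a = (b - a) * k := by ring
          rw [h0, fd_mul_cancel _ k hk]
          congr 1; ring
        have hnext : apFrom k hi (k * a + k) = PySem.Int.floordiv ((b - a) * ((a + 1) * k + b * k)) 2 := by
          have hge : ¬ hi < k * a + k := by linarith
          simp only [apFrom, if_neg hge]
          rw [hbdef]
          have h0 : b * k - (k * a + k) = (b - a - 1) * k := by ring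
          rw [h0, fd_mul_cancel _ k hk]
          congr 1; ring
        rw [hcur, hnext]
        have hid : (b - a + 1) * (a * k + b * k) = (b - a) * ((a + 1) * k + b * k) + (k * a) * 2 := by ring
        rw [hid, fd_two_add]
        ring
    · rw [if_neg hle]
      rw [not_le] at hle
      simp [apFrom, if_pos hle]

-- under B's guard lowerBound + k ≤ hi, A's guarded AP call equals apFrom at B's starting multiple
theorem sumAp_eq_apFrom (k lo hi : Int) (hk : 0 < k) (hg : lo + k ≤ hi) :
    sumApMultiplesInRange k (lo + 1) hi = apFrom k hi (PySem.Int.floordiv (lo + k) k * k) := by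
  have hfb := fd_bounds (lo + k) k hk
  set first := PySem.Int.floordiv (lo + k) k * k with hf
  have hfle : first ≤ lo + k := hfb.1
  have hLR : ¬ (lo + 1 > hi) := by omega
  have hE : lo + 1 + k - 1 = lo + k := by ring
  simp only [sumApMultiplesInRange, if_neg hLR, hE, ← hf]
  rw [if_neg (by omega : ¬ first > hi)]
  simp only [apFrom, if_neg (by omega : ¬ hi < first)]

-- B's fold over the three (modulus, sign) pairs equals A's three guarded closed-form sums
theorem fold_eq_sums (p q lo hi acc : Int) (hp : 0 < p) (hq : 0 < q) :
    ([(p, (1 : Int)), (q, 1), (p * q, -2)].foldl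
      (fun acc ks =>
        if lo + ks.1 ≤ hi then
          let m := PySem.Int.floordiv (lo + ks.1) ks.1 * ks.1
          mulLoop ks.1 hi ks.2 (hi + 1 - m).toNat m acc
        else acc) acc)
    = acc + (if lo + p ≤ hi then sumApMultiplesInRange p (lo + 1) hi else 0)
          + (if lo + q ≤ hi then sumApMultiplesInRange q (lo + 1) hi else 0)
          - 2 * (if lo + p * q ≤ hi then sumApMultiplesInRange (p * q) (lo + 1) hi else 0) := by
  have hpq : 0 < p * q := mul_pos hp hq
  have step : ∀ (k sign a : Int), 0 < k →
      (if lo + k ≤ hi then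
        let m := PySem.Int.floordiv (lo + k) k * k
        mulLoop k hi sign (hi + 1 - m).toNat m a
      else a)
      = a + sign * (if lo + k ≤ hi then sumApMultiplesInRange k (lo + 1) hi else 0) := by
    intro k sign a hk
    by_cases hg : lo + k ≤ hi
    · rw [if_pos hg, if_pos hg]
      rw [mulLoop_eq k hi sign hk _ _ a (Dvd.intro_left _ rfl) le_rfl,
        sumAp_eq_apFrom k lo hi hk hg]
    · rw [if_neg hg, if_neg hg]; ring
  simp only [List.foldl]
  rw [step p 1 acc hp, step q 1 _ hq, step (p * q) (-2) _ hpq]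
  ring

theorem foldl_append_mem (P : Int → Bool) (l : List Int) :
    ∀ (init : List Int), ∀ x ∈ l.foldl (fun primes i => if P i = true then primes ++ [i] else primes) init,
      x ∈ init ∨ x ∈ l := by
  induction l with
  | nil => intro init x hx; exact Or.inl hx
  | cons a t ih =>
    intro init x hx
    simp only [List.foldl] at hx
    rcases ih _ x hx with h | h
    · by_cases hp : P a = true
      · rw [if_pos hp] at h
        rcases List.mem_append.mp h with h | h
        · exact Or.inl h
        · simp at h; simp [h]
      · rw [if_neg hp] at h; exact Or.inl h
    · simp [h]

theorem primeSieve_pos (n : Int) : ∀ x ∈ primeSieve n, 0 < x := by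
  intro x hx
  unfold primeSieve at hx
  rcases foldl_append_mem _ _ _ x hx with h | h
  · simp at h; omega
  · have := ((PySem.List.mem_pyRange_iff_of_pos (by norm_num : (0:Int) < 2)) x).mp h
    omega

theorem loopA_eq_loopB (limit : Int) (primes : List Int) (hpos : ∀ x ∈ primes, 0 < x) :
    ∀ (fuel i : Nat) (lastPrime matchesSum : Int), 0 < lastPrime →
      loopA limit primes fuel i lastPrime matchesSum = loopB limit primes fuel i lastPrime matchesSum := by
  intro fuel
  induction fuel with
  | zero => intro i lastPrime matchesSum _; rw [loopA, loopB]
  | succ fuel ih =>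
    intro i lastPrime matchesSum hlp
    rw [loopA, loopB]
    by_cases h1 : lastPrime ^ 2 ≤ limit
    · by_cases h2 : i + 1 < primes.length
      · rw [if_pos h1, if_pos h1]
        simp only [dif_pos h2]
        have hq : 0 < primes[i + 1] := hpos _ (List.getElem_mem h2)
        rw [fold_eq_sums lastPrime primes[i + 1] (lastPrime ^ 2) (min limit (primes[i + 1] ^ 2 - 1))
          matchesSum hlp hq]
        exact ih (i + 1) primes[i + 1] _ hq
      · rw [if_pos h1, if_pos h1, dif_neg h2, dif_neg h2]
    · rw [if_neg h1, if_neg h1]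

-- ===== VERDICT (by name: the statement is the Claim_ definition above) =====
theorem solution_spec : Claim_equal_solution := by
  intro limit _ _
  unfold Spec_solution solution solution_alt
  have hpos := primeSieve_pos ((Nat.sqrt limit.toNat : Nat) + 100 : Int)
  by_cases h : 0 < (primeSieve ((Nat.sqrt limit.toNat : Nat) + 100 : Int)).length
  · rw [dif_pos h, dif_pos h,
      loopA_eq_loopB limit _ hpos _ 0 _ 0 (hpos _ (List.getElem_mem h))]
  · rw [dif_neg h, dif_neg h]
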